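-- pv_equiv track=rewrite | github.com/Markcanfly/shift-optimizer | solver.py | get_daily_shifts
-- ===== SOURCE A (Python) =====
-- def get_daily_shifts(shifts):
--     """Extract a dictionary of shift ids for each day.
--     Args:
--         shifts: dict of sdata[day_id, shift_id] = {
--             'capacity': 2,
--             'begin': 525,
--             'end': 960
--         }
--     Returns:
--         daily_shifts['day'] = list(shift1_id, shift2_id...)
--     """
--     daily_shifts = dict()
--
--     for d,s in shifts.keys():
--         if d not in daily_shifts.keys():
--             daily_shifts[d] = [s]
--         else:
--             daily_shifts[d].append(s)
--
--     return daily_shifts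
-- ===== SOURCE B (Python) =====
-- def get_daily_shifts(shifts):
--     """Extract a dictionary of shift ids for each day.
--     Two passes instead of incremental grouping: dedupe the days in first-seen
--     order, then build each day's shift-id list by one comprehension."""
--     keys = list(shifts.keys())
--     days = list(dict.fromkeys(d for d, _ in keys))
--     return {d: [s for dd, s in keys if dd == d] for d in days}
-- ===== Notes on version B (the rewrite author's own statement) =====
-- stated objective: simpler
-- what changed: Replaces the incremental contains-test/insert-or-append grouping loop over a mutable dict of lists by a two-pass decomposition: an ordered dedup of the day components followed by one filtering comprehension per day.
import Mathlib
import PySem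

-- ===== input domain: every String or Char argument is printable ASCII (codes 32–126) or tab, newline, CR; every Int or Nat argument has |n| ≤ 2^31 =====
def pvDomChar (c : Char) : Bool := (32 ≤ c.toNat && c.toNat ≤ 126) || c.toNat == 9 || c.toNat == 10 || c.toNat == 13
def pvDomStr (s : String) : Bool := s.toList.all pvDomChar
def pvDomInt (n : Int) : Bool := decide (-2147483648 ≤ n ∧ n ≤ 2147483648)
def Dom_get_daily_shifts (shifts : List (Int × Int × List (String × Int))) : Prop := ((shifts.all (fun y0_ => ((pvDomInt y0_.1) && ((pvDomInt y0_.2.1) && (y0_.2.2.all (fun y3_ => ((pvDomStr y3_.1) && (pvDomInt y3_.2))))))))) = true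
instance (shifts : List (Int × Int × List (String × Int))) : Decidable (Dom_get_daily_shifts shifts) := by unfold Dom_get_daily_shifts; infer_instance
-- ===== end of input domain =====

-- B replaces A's incremental contains-test/insert-or-append grouping loop by a two-pass
-- decomposition (ordered dedup of the days, then one filter per day): simpler, not faster.


-- ===== PORT A =====
def get_daily_shifts (shifts : List (Int × Int × List (String × Int))) : List (Int × List Int) :=
  let daily_shifts : PySem.Dict Int (List Int) :=
    shifts.foldl (fun daily e =>
      let d := e.1
      let s := e.2.1
      if !(daily.contains d) then daily.insert d [s]          -- daily_shifts[d] = [s]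
      else daily.modify d [] (fun l => l ++ [s]))             -- daily_shifts[d].append(s)
      PySem.Dict.empty
  daily_shifts.items

-- ===== PORT B =====
def get_daily_shifts_alt (shifts : List (Int × Int × List (String × Int))) : List (Int × List Int) :=
  let keys := shifts.map (fun e => (e.1, e.2.1))              -- list(shifts.keys())
  let days := PySem.List.dedup (keys.map (fun p => p.1))      -- list(dict.fromkeys(d for d, _ in keys))
  days.map (fun d => (d, (keys.filter (fun p => p.1 == d)).map (fun p => p.2)))

-- ===== PRECONDITION & SPEC =====
def Spec_get_daily_shifts (shifts : List (Int × Int × List (String × Int))) (out : List (Int × List Int)) : Prop := out = get_daily_shifts_alt shifts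
instance (shifts : List (Int × Int × List (String × Int))) (out : List (Int × List Int)) : Decidable (Spec_get_daily_shifts shifts out) := by unfold Spec_get_daily_shifts; infer_instance

-- ===== CLAIM (what is proved, stated in full; the proofs are below) =====
def Claim_equal_get_daily_shifts : Prop := ∀ (shifts : List (Int × Int × List (String × Int))), Dom_get_daily_shifts shifts → Spec_get_daily_shifts shifts (get_daily_shifts shifts)

-- ===== LEMMAS AND PROOFS =====

-- A's branch (insert a fresh key / append to an existing one) is one unconditional Dict.modify.
theorem step_eq_modify (d : PySem.Dict Int (List Int)) (k : Int) (s : Int) :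
    (if !(d.contains k) then d.insert k [s] else d.modify k [] (fun l => l ++ [s]))
      = d.modify k [] (fun l => l ++ [s]) := by
  by_cases h : d.contains k
  · simp [h]
  · simp only [Bool.not_eq_true] at h
    have hg : d.get? k = none := (PySem.Dict.get?_eq_none_iff_contains d k).mpr h
    simp [h, PySem.Dict.modify, PySem.Dict.insert, PySem.Dict.getD, hg]

theorem get_daily_shifts_eq_alt (shifts : List (Int × Int × List (String × Int))) :
    get_daily_shifts shifts = get_daily_shifts_alt shifts := by
  unfold get_daily_shifts get_daily_shifts_alt
  have hfold : shifts.foldl (fun daily e =>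
      if !(daily.contains e.1) then daily.insert e.1 [e.2.1]
      else daily.modify e.1 [] (fun l => l ++ [e.2.1])) PySem.Dict.empty
    = (shifts.map (fun e => (e.1, e.2.1))).foldl
        (fun d p => d.modify p.1 [] (fun l => l ++ [p.2])) PySem.Dict.empty := by
    rw [List.foldl_map]
    exact PySem.List.foldl_congr_mem _ _ _ _ (fun d e _ => step_eq_modify d e.1 e.2.1)
  simp only []
  rw [hfold]
  set l := shifts.map (fun e => (e.1, e.2.1)) with hl
  have hnd : ((l.foldl (fun d p => d.modify p.1 [] (fun v => v ++ [p.2])) PySem.Dict.empty)).keys.Nodup :=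
    PySem.Dict.nodup_keys_foldl_modify_key l (fun p => p.1) [] (fun _ p => (fun v => v ++ [p.2])) PySem.Dict.empty PySem.Dict.nodup_keys_empty
  rw [PySem.Dict.items_eq_map_keys _ hnd []]
  rw [PySem.Dict.keys_foldl_modify_key]
  simp only [PySem.Dict.keys_empty, PySem.Set.update_nil_left]
  rw [PySem.List.dedup_eq_ofList]
  apply List.map_congr_left
  intro c _
  rw [PySem.Dict.getD_foldl_modify_append]
  simp [PySem.Dict.getD_empty]

-- ===== VERDICT (by name: the statement is the Claim_ definition above) =====
theorem get_daily_shifts_spec : Claim_equal_get_daily_shifts := by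
  intro shifts _
  exact get_daily_shifts_eq_alt shifts
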